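-- pv_equiv track=rewrite | github.com/redachourouki/FilZin | mainenh.py | create_nail_labels
-- ===== SOURCE A (Python) =====
-- CIRCLE_NAIL_COUNT = 200       # exactly 200 nails as requested[web:26][web:31]
--
-- def create_nail_labels(nail_count=CIRCLE_NAIL_COUNT):
--     """Create sectioned nail labels: A1-A50, B1-B50, C1-C50, D1-D50"""
--     labels = []
--     sections = ['A', 'B', 'C', 'D']
--     nails_per_section = nail_count // 4  # 50 nails per section
--
--     for section_idx, section in enumerate(sections):
--         for nail_num in range(1, nails_per_section + 1):
--             labels.append(f"{section}{nail_num}")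
--
--     return labels
-- ===== SOURCE B (Python) =====
-- def create_nail_labels(nail_count=200):
--     """Create sectioned nail labels: A1-A50, B1-B50, C1-C50, D1-D50"""
--     sections = ['A', 'B', 'C', 'D']
--     nails_per_section = nail_count // 4
--     total = 4 * nails_per_section
--     return [f"{sections[i // nails_per_section]}{i % nails_per_section + 1}"
--             for i in range(total)]
-- ===== Notes on version B (the rewrite author's own statement) =====
-- stated objective: alternative
-- what changed: Replaced the two nested loops (sections x nail numbers) by a single flat list comprehension over range(4*nails_per_section) that derives each label's section and number from the index by divmod arithmetic.
import Mathlib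
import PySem

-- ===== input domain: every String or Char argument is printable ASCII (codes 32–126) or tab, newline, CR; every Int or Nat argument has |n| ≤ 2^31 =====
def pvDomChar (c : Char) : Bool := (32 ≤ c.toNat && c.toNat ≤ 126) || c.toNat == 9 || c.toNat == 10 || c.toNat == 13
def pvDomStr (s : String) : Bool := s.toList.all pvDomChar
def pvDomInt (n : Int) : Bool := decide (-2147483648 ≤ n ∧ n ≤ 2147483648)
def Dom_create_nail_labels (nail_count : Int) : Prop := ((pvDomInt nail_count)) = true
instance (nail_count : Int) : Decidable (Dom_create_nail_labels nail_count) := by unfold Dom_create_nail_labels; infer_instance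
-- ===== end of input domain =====

-- B replaces A's two nested loops by one flat list comprehension deriving each
-- label from its index by divmod arithmetic (objective: alternative; same cost).

-- ===== PORT A =====
def create_nail_labels (nail_count : Int) : List String :=
  let sections : List String := ["A", "B", "C", "D"]
  let nails_per_section : Int := PySem.Int.floordiv nail_count 4
  (PySem.List.enumerate sections).foldl
    (fun labels (p : Int × String) =>
      (PySem.List.pyRange 1 (nails_per_section + 1) 1).foldl
        (fun labels nail_num => labels ++ [p.2 ++ PySem.Int.toStr nail_num])
        labels)
    []

-- ===== PORT B =====
def create_nail_labels_alt (nail_count : Int) : List String :=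
  let sections : List String := ["A", "B", "C", "D"]
  let nails_per_section : Int := PySem.Int.floordiv nail_count 4
  let total : Int := 4 * nails_per_section
  -- sections[i // nails_per_section]: the index is always 0..3 when the loop body
  -- runs (0 ≤ i < 4*nails_per_section), so the .getD default is never used.
  (PySem.List.pyRange 0 total 1).map
    (fun i =>
      ((PySem.List.pyGet? sections (PySem.Int.floordiv i nails_per_section)).getD "")
        ++ PySem.Int.toStr (PySem.Int.mod i nails_per_section + 1))

-- ===== PRECONDITION & SPEC =====
def Spec_create_nail_labels (nail_count : Int) (out : List String) : Prop := out = create_nail_labels_alt nail_count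
instance (nail_count : Int) (out : List String) : Decidable (Spec_create_nail_labels nail_count out) := by unfold Spec_create_nail_labels; infer_instance

-- ===== CLAIM (what is proved, stated in full; the proofs are below) =====
def Claim_equal_create_nail_labels : Prop := ∀ (nail_count : Int), Dom_create_nail_labels nail_count → Spec_create_nail_labels nail_count (create_nail_labels nail_count)

-- ===== LEMMAS AND PROOFS =====

-- One chunk of B's flat range, [s*m, (s+1)*m), maps to one of A's section blocks.
lemma chunk_eq (m s : Int) (hm : 0 < m) (sec : String)
    (hsec : (PySem.List.pyGet? ["A", "B", "C", "D"] s).getD "" = sec) :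
    (PySem.List.pyRange (s * m) ((s + 1) * m) 1).map
      (fun i => ((PySem.List.pyGet? ["A", "B", "C", "D"] (PySem.Int.floordiv i m)).getD "")
                  ++ PySem.Int.toStr (PySem.Int.mod i m + 1))
    = (PySem.List.pyRange 1 (m + 1) 1).foldl
        (fun labels nail_num => labels ++ [sec ++ PySem.Int.toStr nail_num]) [] := by
  rw [PySem.List.foldl_append_singleton_eq_map]
  rw [PySem.List.pyRange_one, PySem.List.pyRange_one]
  have h1 : ((s + 1) * m - s * m).toNat = m.toNat := by
    have : (s + 1) * m - s * m = m := by ring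
    rw [this]
  have h2 : (m + 1 - 1).toNat = m.toNat := by norm_num
  rw [h1, h2, List.map_map, List.map_map]
  apply List.map_congr_left
  intro k hk
  have hkm : (k : Int) < m := by
    have := List.mem_range.mp hk
    omega
  have hdiv : PySem.Int.floordiv (s * m + (k : Int)) m = s := by
    rw [PySem.Int.floordiv_eq_iff_of_pos hm]
    constructor
    · omega
    · have : (s + 1) * m = s * m + m := by ring
      omega
  have hmod : PySem.Int.mod (s * m + (k : Int)) m = (k : Int) := by
    have h := PySem.Int.floordiv_mul_add_mod (s * m + (k : Int)) m
    rw [hdiv] at h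
    omega
  simp only [Function.comp_apply, hdiv, hmod, hsec]
  rw [add_comm (1 : Int) (k : Int)]

-- ===== VERDICT (by name: the statement is the Claim_ definition above) =====
theorem create_nail_labels_spec : Claim_equal_create_nail_labels := by
  intro n _
  unfold Spec_create_nail_labels create_nail_labels create_nail_labels_alt
  simp only [PySem.List.enumerate_cons, PySem.List.enumerate_nil, List.foldl_cons, List.foldl_nil]
  set m : Int := PySem.Int.floordiv n 4 with hm
  by_cases hmp : 0 < m
  · -- split B's flat range into the four section chunks
    have split : PySem.List.pyRange 0 (4 * m) 1 =
        PySem.List.pyRange (0 * m) ((0 + 1) * m) 1 ++ PySem.List.pyRange (1 * m) ((1 + 1) * m) 1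
          ++ PySem.List.pyRange (2 * m) ((2 + 1) * m) 1 ++ PySem.List.pyRange (3 * m) ((3 + 1) * m) 1 := by
      norm_num
      rw [PySem.List.pyRange_one_append 0 m (4 * m) (by omega) (by omega),
          PySem.List.pyRange_one_append m (2 * m) (4 * m) (by omega) (by omega),
          PySem.List.pyRange_one_append (2 * m) (3 * m) (4 * m) (by omega) (by omega)]
    rw [split]
    simp only [List.map_append]
    rw [chunk_eq m 0 hmp "A" (by decide), chunk_eq m 1 hmp "B" (by decide),
        chunk_eq m 2 hmp "C" (by decide), chunk_eq m 3 hmp "D" (by decide)]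
    -- A's nested foldl appends each block onto the accumulator
    simp only [PySem.List.foldl_append_singleton_eq_map]
    simp [List.append_assoc]
  · -- nails_per_section ≤ 0: both sides are empty
    rw [PySem.List.pyRange_one_eq_nil (by omega : m + 1 ≤ 1),
        PySem.List.pyRange_one_eq_nil (by omega : 4 * m ≤ 0)]
    simp
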